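-- pv_equiv track=rewrite | github.com/GlebMikhailov/Algorithms | tinkoff/ex_5.py | f
-- ===== SOURCE A (Python) =====
-- def f(arr):
--     c = 0
--     second_iterations = 0
--     for i in range(0, len(arr)):
--         for j in range(i + 1, len(arr)):
--             second_iterations += 1
--             if is_normal(arr, i, j):
--                 c += len(arr) - i - second_iterations
--                 break
--         second_iterations = 0
--     return c
--
-- def is_normal(a: list, i: int, j: int):
--     s = 0
--     for k in range(i, j + 1):
--         if a[k] == 0:
--             continue
--         s += a[k]
--         if s == 0:
--             return True
--     return False
-- ===== SOURCE B (Python) =====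
-- def f(arr):
--     # One running-sum scan per start index replaces A's inner j-loop that
--     # re-sums the window from scratch via is_normal for every j.
--     n = len(arr)
--     total = 0
--     for i in range(n):
--         s = 0
--         for k in range(i, n):
--             if arr[k] != 0:
--                 s += arr[k]
--                 if s == 0:
--                     total += n - k
--                     break
--     return total
-- ===== Notes on version B (the rewrite author's own statement) =====
-- stated objective: faster
-- what changed: For each start index i, B keeps one running sum while scanning right and adds n-k at the first nonzero element k where the sum hits 0, eliminating A's inner j-loop that re-sums the whole window via is_normal for every j.
import Mathlib
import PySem

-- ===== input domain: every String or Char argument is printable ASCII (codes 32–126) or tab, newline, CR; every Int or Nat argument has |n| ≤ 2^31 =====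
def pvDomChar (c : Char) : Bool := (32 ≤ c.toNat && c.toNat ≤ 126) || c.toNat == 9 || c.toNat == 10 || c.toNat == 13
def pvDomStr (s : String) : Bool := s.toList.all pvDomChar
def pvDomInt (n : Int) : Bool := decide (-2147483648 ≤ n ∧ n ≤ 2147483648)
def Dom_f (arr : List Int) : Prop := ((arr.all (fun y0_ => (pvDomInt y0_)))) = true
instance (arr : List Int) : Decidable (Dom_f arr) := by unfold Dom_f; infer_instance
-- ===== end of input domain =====

-- B replaces A's per-(i,j) re-summation (is_normal) by a single running-sum scan per start
-- index i, an asymptotic speed-up; same return value on every input.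

-- ===== PORT A =====
-- is_normal's loop over k in range(i, j+1); indices are in range at every call site of f,
-- so pyGetD with default 0 is exact there.
def isNormalGo (a : List Int) (s : Int) : List Int → Bool
  | [] => false
  | k :: rest =>
    let ak := PySem.List.pyGetD a k 0
    if ak = 0 then isNormalGo a s rest
    else if s + ak = 0 then true else isNormalGo a (s + ak) rest

def isNormal (a : List Int) (i j : Int) : Bool :=
  isNormalGo a 0 (PySem.List.pyRange i (j + 1) 1)

-- inner loop over j with the second_iterations counter and the break
def fInnerGo (arr : List Int) (i c si : Int) : List Int → Int
  | [] => c
  | j :: rest =>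
    if isNormal arr i j then c + (arr.length : Int) - i - (si + 1)
    else fInnerGo arr i c (si + 1) rest

def f (arr : List Int) : Int :=
  (PySem.List.pyRange 0 (arr.length : Int) 1).foldl
    (fun c i => fInnerGo arr i c 0 (PySem.List.pyRange (i + 1) (arr.length : Int) 1)) 0

-- ===== PORT B =====
-- scan k from i with a running sum; first nonzero element where the sum hits 0 contributes n-k
def scanGo (arr : List Int) (n s : Int) : List Int → Int
  | [] => 0
  | k :: rest =>
    let ak := PySem.List.pyGetD arr k 0
    if ak = 0 then scanGo arr n s rest
    else if s + ak = 0 then n - k else scanGo arr n (s + ak) rest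

def f_alt (arr : List Int) : Int :=
  let n : Int := (arr.length : Int)
  (PySem.List.pyRange 0 n 1).foldl
    (fun tot i => tot + scanGo arr n 0 (PySem.List.pyRange i n 1)) 0

-- ===== PRECONDITION & SPEC =====
def Spec_f (arr : List Int) (out : Int) : Prop := out = f_alt arr
instance (arr : List Int) (out : Int) : Decidable (Spec_f arr out) := by unfold Spec_f; infer_instance

-- ===== CLAIM (what is proved, stated in full; the proofs are below) =====
def Claim_equal_f : Prop := ∀ (arr : List Int), Dom_f arr → Spec_f arr (f arr)

-- ===== LEMMAS AND PROOFS =====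

-- first index k in ks whose (nonzero) value drives the running sum to 0
def firstTrig (a : List Int) (s : Int) : List Int → Option Int
  | [] => none
  | k :: rest =>
    let ak := PySem.List.pyGetD a k 0
    if ak = 0 then firstTrig a s rest
    else if s + ak = 0 then some k else firstTrig a (s + ak) rest

def runSum (a : List Int) (s : Int) (ks : List Int) : Int :=
  ks.foldl (fun s k => s + PySem.List.pyGetD a k 0) s

theorem scanGo_eq_firstTrig (arr : List Int) (n : Int) :
    ∀ (ks : List Int) (s : Int),
      scanGo arr n s ks = (firstTrig arr s ks).elim 0 (fun k => n - k) := by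
  intro ks
  induction ks with
  | nil => intro s; simp [scanGo, firstTrig]
  | cons k rest ih =>
    intro s
    simp only [scanGo, firstTrig]
    split_ifs with h1 h2 <;> simp [ih]

theorem isNormalGo_eq_firstTrig (a : List Int) :
    ∀ (ks : List Int) (s : Int),
      isNormalGo a s ks = (firstTrig a s ks).isSome := by
  intro ks
  induction ks with
  | nil => intro s; simp [isNormalGo, firstTrig]
  | cons k rest ih =>
    intro s
    simp only [isNormalGo, firstTrig]
    split_ifs with h1 h2 <;> simp [ih]

theorem firstTrig_append (a : List Int) :
    ∀ (xs ys : List Int) (s : Int),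
      firstTrig a s (xs ++ ys) =
        (firstTrig a s xs).elim (firstTrig a (runSum a s xs) ys) some := by
  intro xs
  induction xs with
  | nil => intro ys s; simp [firstTrig, runSum]
  | cons k rest ih =>
    intro ys s
    simp only [List.cons_append, firstTrig, runSum, List.foldl_cons]
    split_ifs with h1 h2 <;> simp_all [runSum]

-- the inner j-loop of A equals first-trigger search on [i, n)
theorem inner_main (arr : List Int) (i : Int) :
    ∀ (m : Nat) (j c : Int), i < j →
      (((arr.length : Int) - j).toNat ≤ m) →
      firstTrig arr 0 (PySem.List.pyRange i j 1) = none →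
      fInnerGo arr i c (j - i - 1) (PySem.List.pyRange j (arr.length : Int) 1)
        = c + (firstTrig arr 0 (PySem.List.pyRange i (arr.length : Int) 1)).elim 0
              (fun k => (arr.length : Int) - k) := by
  intro m
  induction m with
  | zero =>
    intro j c hij hm hnone
    have hnj : (arr.length : Int) ≤ j := by omega
    rw [PySem.List.pyRange_one_eq_nil hnj]
    by_cases hin : i ≤ (arr.length : Int)
    · have hsplit := PySem.List.pyRange_one_append i (arr.length : Int) j hin hnj
      rw [hsplit, firstTrig_append] at hnone
      cases hfx : firstTrig arr 0 (PySem.List.pyRange i (arr.length : Int) 1) with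
      | none => simp [fInnerGo]
      | some k => rw [hfx] at hnone; simp at hnone
    · rw [PySem.List.pyRange_one_eq_nil (by omega)]
      simp [fInnerGo, firstTrig]
  | succ m ih =>
    intro j c hij hm hnone
    by_cases hjn : (arr.length : Int) ≤ j
    · -- same as base case
      rw [PySem.List.pyRange_one_eq_nil hjn]
      by_cases hin : i ≤ (arr.length : Int)
      · have hsplit := PySem.List.pyRange_one_append i (arr.length : Int) j hin hjn
        rw [hsplit, firstTrig_append] at hnone
        cases hfx : firstTrig arr 0 (PySem.List.pyRange i (arr.length : Int) 1) with
        | none => simp [fInnerGo]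
        | some k => rw [hfx] at hnone; simp at hnone
      · rw [PySem.List.pyRange_one_eq_nil (by omega)]
        simp [fInnerGo, firstTrig]
    · have hjlt : j < (arr.length : Int) := by omega
      rw [PySem.List.pyRange_one_cons hjlt]
      have hstep : PySem.List.pyRange i (j + 1) 1 = PySem.List.pyRange i j 1 ++ [j] :=
        PySem.List.pyRange_one_succ_right (by omega)
      have htrig : firstTrig arr 0 (PySem.List.pyRange i (j + 1) 1)
          = firstTrig arr (runSum arr 0 (PySem.List.pyRange i j 1)) [j] := by
        rw [hstep, firstTrig_append, hnone]; simp
      simp only [fInnerGo, isNormal, isNormalGo_eq_firstTrig, htrig]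
      set sj := runSum arr 0 (PySem.List.pyRange i j 1) with hsj
      by_cases hz : PySem.List.pyGetD arr j 0 = 0
      · -- arr[j] = 0: no trigger at j, recurse
        have h1 : firstTrig arr sj [j] = none := by simp [firstTrig, hz]
        rw [h1]
        simp only [Option.isSome_none, Bool.false_eq_true, if_false]
        have := ih (j + 1) c (by omega) (by omega) (by rw [htrig, h1])
        have harg : j + 1 - i - 1 = j - i - 1 + 1 := by ring
        rw [harg] at this
        exact this
      · by_cases hs : sj + PySem.List.pyGetD arr j 0 = 0
        · -- trigger at j
          have h1 : firstTrig arr sj [j] = some j := by simp [firstTrig, hz, hs]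
          rw [h1]
          simp only [Option.isSome_some, if_true]
          have hsplit2 : PySem.List.pyRange i (arr.length : Int) 1
              = PySem.List.pyRange i (j + 1) 1 ++ PySem.List.pyRange (j + 1) (arr.length : Int) 1 :=
            PySem.List.pyRange_one_append i (j + 1) (arr.length : Int) (by omega) (by omega)
          rw [hsplit2, firstTrig_append, htrig, h1]
          simp only [Option.elim_some]
          ring
        · -- nonzero but no trigger: recurse with updated sum
          have h1 : firstTrig arr sj [j] = none := by simp [firstTrig, hz, hs]
          rw [h1]
          simp only [Option.isSome_none, Bool.false_eq_true, if_false]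
          have := ih (j + 1) c (by omega) (by omega) (by rw [htrig, h1])
          have harg : j + 1 - i - 1 = j - i - 1 + 1 := by ring
          rw [harg] at this
          exact this

theorem per_i (arr : List Int) (i c : Int) :
    fInnerGo arr i c 0 (PySem.List.pyRange (i + 1) (arr.length : Int) 1)
      = c + scanGo arr (arr.length : Int) 0 (PySem.List.pyRange i (arr.length : Int) 1) := by
  rw [scanGo_eq_firstTrig]
  have h0 : firstTrig arr 0 (PySem.List.pyRange i (i + 1) 1) = none := by
    rw [PySem.List.pyRange_one_singleton]
    simp only [firstTrig]
    split_ifs with h1 h2 <;> simp_all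
  have := inner_main arr i (((arr.length : Int) - (i + 1)).toNat) (i + 1) c (by omega)
    (le_refl _) h0
  have harg : i + 1 - i - 1 = (0 : Int) := by ring
  rw [harg] at this
  exact this

-- ===== VERDICT (by name: the statement is the Claim_ definition above) =====
theorem f_spec : Claim_equal_f := by
  intro arr _
  unfold Spec_f f f_alt
  have hfun : (fun c i => fInnerGo arr i c 0 (PySem.List.pyRange (i + 1) (arr.length : Int) 1))
      = (fun tot i => tot + scanGo arr (arr.length : Int) 0
          (PySem.List.pyRange i (arr.length : Int) 1)) := by
    funext c i; exact per_i arr i c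
  rw [hfun]
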